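-- pv_equiv track=rewrite | github.com/tamlog06/AntBook | 2-3/gameDP/TDPC_B.py | solve
-- ===== SOURCE A (Python) =====
-- def solve(A, B, a, b):
--     dp = [[0] * (B + 1) for _ in range(A + 1)]
--     a = [0] + a[::-1]
--     b = [0] + b[::-1]
--
--     for i in range(A):
--         dp[i+1][0] = a[i+1] - dp[i][0]
--
--     for j in range(B):
--         dp[0][j+1] = b[j+1] - dp[0][j]
--
--     for i in range(1, A+1):
--         for j in range(1, B+1):
--             dp[i][j] = max(a[i] - dp[i-1][j], b[j] - dp[i][j-1])
--
--     ans = (sum(a) + sum(b) + dp[A][B])//2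
--     return ans
-- ===== SOURCE B (Python) =====
-- def solve(A, B, a, b):
--     # Demand-driven evaluation: the game value at (A, B) is computed top-down with an
--     # explicit work stack and a dictionary cache, instead of A's three staged loops
--     # filling a complete (A+1)x(B+1) table bottom-up.
--     ra = [0] + a[::-1]
--     rb = [0] + b[::-1]
--     memo = {(0, 0): 0}
--     stack = [(A, B)]
--     while stack:
--         i, j = stack[-1]
--         if (i, j) in memo:
--             stack.pop()
--         elif i > 0 and (i - 1, j) not in memo:
--             stack.append((i - 1, j))
--         elif j > 0 and (i, j - 1) not in memo:
--             stack.append((i, j - 1))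
--         else:
--             best = None
--             if i > 0:
--                 best = ra[i] - memo[(i - 1, j)]
--             if j > 0:
--                 v = rb[j] - memo[(i, j - 1)]
--                 if best is None or v > best:
--                     best = v
--             memo[(i, j)] = best
--             stack.pop()
--     return (sum(ra) + sum(rb) + memo[(A, B)]) // 2
-- ===== Notes on version B (the rewrite author's own statement) =====
-- stated objective: alternative
-- what changed: Replaces A's bottom-up fill of a complete (A+1)x(B+1) table via three staged loops by a demand-driven top-down evaluation of the game value at (A,B) with an explicit work stack and a dictionary cache, with the base rows handled uniformly as a max over available moves.
import Mathlib
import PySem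

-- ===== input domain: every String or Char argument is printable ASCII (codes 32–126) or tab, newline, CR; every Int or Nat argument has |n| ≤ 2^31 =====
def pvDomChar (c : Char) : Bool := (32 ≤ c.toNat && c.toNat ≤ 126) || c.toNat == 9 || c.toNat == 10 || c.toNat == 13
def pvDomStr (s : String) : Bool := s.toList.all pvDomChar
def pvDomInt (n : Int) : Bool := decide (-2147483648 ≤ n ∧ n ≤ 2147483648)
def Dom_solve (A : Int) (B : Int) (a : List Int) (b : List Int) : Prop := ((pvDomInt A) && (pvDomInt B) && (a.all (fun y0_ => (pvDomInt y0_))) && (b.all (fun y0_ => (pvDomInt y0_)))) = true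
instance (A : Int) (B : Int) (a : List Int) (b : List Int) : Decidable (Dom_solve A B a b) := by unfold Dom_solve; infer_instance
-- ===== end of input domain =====

-- B replaces A's three staged bottom-up table-filling loops by a demand-driven top-down
-- evaluation with an explicit work stack and a dictionary cache (different decomposition,
-- same return value).


-- ===== PORT A =====
-- dp[i][j] = x  (all indices A writes/reads in its loops are ≥ 0, so List.set/getD are exact there)
def pvSet2 (dp : List (List Int)) (i j : Nat) (x : Int) : List (List Int) :=
  dp.set i ((dp.getD i []).set j x)

def solve (A : Int) (B : Int) (a : List Int) (b : List Int) : Int :=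
  -- dp = [[0]*(B+1) for _ in range(A+1)]
  let dp0 : List (List Int) := List.replicate (A+1).toNat (List.replicate (B+1).toNat (0:Int))
  -- a = [0] + a[::-1] ; b = [0] + b[::-1]
  let a' : List Int := 0 :: a.reverse
  let b' : List Int := 0 :: b.reverse
  -- for i in range(A): dp[i+1][0] = a[i+1] - dp[i][0]
  let dp1 := (PySem.List.pyRange 0 A 1).foldl (fun dp i =>
      pvSet2 dp (i+1).toNat 0 (PySem.List.pyGetD a' (i+1) 0 - (dp.getD i.toNat []).getD 0 0)) dp0
  -- for j in range(B): dp[0][j+1] = b[j+1] - dp[0][j]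
  let dp2 := (PySem.List.pyRange 0 B 1).foldl (fun dp j =>
      pvSet2 dp 0 (j+1).toNat (PySem.List.pyGetD b' (j+1) 0 - (dp.getD 0 []).getD j.toNat 0)) dp1
  -- for i in range(1, A+1): for j in range(1, B+1): dp[i][j] = max(a[i]-dp[i-1][j], b[j]-dp[i][j-1])
  let dp3 := (PySem.List.pyRange 1 (A+1) 1).foldl (fun dp i =>
      (PySem.List.pyRange 1 (B+1) 1).foldl (fun dp j =>
        pvSet2 dp i.toNat j.toNat
          (max (PySem.List.pyGetD a' i 0 - (dp.getD (i-1).toNat []).getD j.toNat 0)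
               (PySem.List.pyGetD b' j 0 - (dp.getD i.toNat []).getD (j-1).toNat 0))) dp) dp2
  -- ans = (sum(a) + sum(b) + dp[A][B])//2
  PySem.Int.floordiv (a'.sum + b'.sum + PySem.List.pyGetD (PySem.List.pyGetD dp3 A []) B 0) 2

-- ===== PORT B =====
-- The while-loop of Source B; the Python stack top xs[-1] is the head of the Lean list.
-- The fuel argument only makes the recursion total (the loop is proved below to stop
-- before any fuel of the size solve_alt passes runs out); each branch is Source B's.
-- memo[...] reads are guarded by the branch conditions, so Dict.getD is exact;
-- 'best' is Python's None-seeded running maximum, so Option Int with .getD 0 at the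
-- store (the none case is unreachable exactly as Python never stores None).
def pvLoop (ra rb : List Int) : Nat → PySem.Dict (Int × Int) Int → List (Int × Int) → PySem.Dict (Int × Int) Int
  | 0, memo, _ => memo
  | _+1, memo, [] => memo
  | fuel+1, memo, (i, j) :: rest =>
    if (memo.get? (i, j)).isSome then
      pvLoop ra rb fuel memo rest
    else if 0 < i ∧ memo.get? (i - 1, j) = none then
      pvLoop ra rb fuel memo ((i - 1, j) :: (i, j) :: rest)
    else if 0 < j ∧ memo.get? (i, j - 1) = none then
      pvLoop ra rb fuel memo ((i, j - 1) :: (i, j) :: rest)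
    else
      let best0 : Option Int :=
        if 0 < i then some (PySem.List.pyGetD ra i 0 - memo.getD (i - 1, j) 0) else none
      let best : Option Int :=
        if 0 < j then
          let v := PySem.List.pyGetD rb j 0 - memo.getD (i, j - 1) 0
          match best0 with
          | none => some v
          | some w => if v > w then some v else some w
        else best0
      pvLoop ra rb fuel (memo.insert (i, j) (best.getD 0)) rest

def solve_alt (A : Int) (B : Int) (a : List Int) (b : List Int) : Int :=
  -- ra = [0] + a[::-1] ; rb = [0] + b[::-1]
  let ra : List Int := 0 :: a.reverse
  let rb : List Int := 0 :: b.reverse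
  -- memo = {(0,0): 0}; stack = [(A,B)]; while stack: …
  let memo := pvLoop ra rb (2 * (A.toNat + 1) * (B.toNat + 1) + 2)
      ((PySem.Dict.empty).insert ((0:Int), (0:Int)) 0) [(A, B)]
  -- return (sum(ra) + sum(rb) + memo[(A,B)]) // 2   (the final lookup is proved present, so getD is exact)
  PySem.Int.floordiv (ra.sum + rb.sum + memo.getD (A, B) 0) 2

-- ===== PRECONDITION & SPEC =====
-- Exactly the inputs on which the Python A returns: a negative A or B, or A > len(a), or B > len(b),
-- makes A raise IndexError (empty dp row / out-of-range read of the reversed stack).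
def Pre_solve (A : Int) (B : Int) (a : List Int) (b : List Int) : Prop :=
  0 ≤ A ∧ 0 ≤ B ∧ A ≤ (a.length : Int) ∧ B ≤ (b.length : Int)
instance (A : Int) (B : Int) (a : List Int) (b : List Int) : Decidable (Pre_solve A B a b) := by
  unfold Pre_solve; infer_instance

def pvWitness_solve : Int × Int × List Int × List Int := (2, 1, [3, 1], [5])

def Spec_solve (A : Int) (B : Int) (a : List Int) (b : List Int) (out : Int) : Prop := out = solve_alt A B a b
instance (A : Int) (B : Int) (a : List Int) (b : List Int) (out : Int) : Decidable (Spec_solve A B a b out) := by unfold Spec_solve; infer_instance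

-- ===== CLAIM (what is proved, stated in full; the proofs are below) =====
def Claim_equal_solve : Prop := ∀ (A : Int) (B : Int) (a : List Int) (b : List Int), Dom_solve A B a b → Pre_solve A B a b → Spec_solve A B a b (solve A B a b)

-- ===== LEMMAS AND PROOFS =====

-- The common game value: pvG ra rb i j with ra = a.reverse, rb = b.reverse.
def pvG (ra rb : List Int) : Nat → Nat → Int
  | 0, 0 => 0
  | i+1, 0 => ra.getD i 0 - pvG ra rb i 0
  | 0, j+1 => rb.getD j 0 - pvG ra rb 0 j
  | i+1, j+1 => max (ra.getD i 0 - pvG ra rb i (j+1)) (rb.getD j 0 - pvG ra rb (i+1) j)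
termination_by i j => (i, j)

def pvPart (ra rb : List Int) (Bn r j : Nat) : List Int :=
  (List.range (Bn+1)).map (fun t => if t ≤ j then pvG ra rb r t else 0)

lemma pv_set_map_range {α : Type} (n i : Nat) (f : Nat → α) (v : α) :
    ((List.range n).map f).set i v = (List.range n).map (fun t => if t = i then v else f t) := by
  apply List.ext_getElem
  · simp
  · intro t h1 h2
    simp only [List.getElem_set, List.getElem_map, List.getElem_range] at *
    by_cases h : i = t
    · subst h; simp
    · have h' : ¬ t = i := fun hh => h hh.symm
      simp [h, h']

lemma pv_part_set_succ (ra rb : List Int) (Bn r j : Nat) :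
    (pvPart ra rb Bn r j).set (j+1) (pvG ra rb r (j+1)) = pvPart ra rb Bn r (j+1) := by
  unfold pvPart
  rw [pv_set_map_range]
  apply List.map_congr_left
  intro t ht
  rcases Nat.lt_or_ge t (j+1) with h | h
  · have : t ≠ j + 1 := by omega
    simp [this, Nat.le_of_lt_succ h, Nat.le_of_lt_succ (Nat.lt_succ_of_lt h)]
  · rcases Nat.eq_or_lt_of_le h with h' | h'
    · simp [h'.symm]
    · have h1 : t ≠ j + 1 := by omega
      have h2 : ¬ t ≤ j := by omega
      have h3 : ¬ t ≤ j + 1 := by omega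
      simp [h1, h2, h3]

lemma pv_replicate_eq_part0 (ra rb : List Int) (Bn : Nat) :
    List.replicate (Bn+1) (0:Int) = pvPart ra rb Bn 0 0 := by
  apply List.ext_getElem
  · simp [pvPart]
  · intro t h1 h2
    simp only [pvPart, List.getElem_replicate, List.getElem_map, List.getElem_range]
    rcases Nat.eq_zero_or_pos t with h | h
    · subst h; simp [pvG]
    · have : ¬ t ≤ 0 := by omega
      simp [this]

lemma pv_set_zero_replicate (ra rb : List Int) (Bn r : Nat) :
    (List.replicate (Bn+1) (0:Int)).set 0 (pvG ra rb r 0) = pvPart ra rb Bn r 0 := by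
  apply List.ext_getElem
  · simp [pvPart]
  · intro t h1 h2
    simp only [List.getElem_set, List.getElem_replicate, pvPart, List.getElem_map, List.getElem_range]
    rcases Nat.eq_zero_or_pos t with h | h
    · subst h; simp
    · have h1 : ¬ (0 = t) := by omega
      have h2 : ¬ t ≤ 0 := by omega
      simp [h1, h2]

lemma pv_part_getD (ra rb : List Int) (Bn r j t : Nat) (ht : t ≤ Bn) (htj : t ≤ j) :
    (pvPart ra rb Bn r j).getD t 0 = pvG ra rb r t := by
  unfold pvPart
  rw [PySem.List.getD_map_range _ _ _ _ (by omega)]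
  simp [htj]

-- A loop 1 (fill column 0)
lemma pvA1 (ra rb : List Int) (An Bn m : Nat) (hm : m ≤ An) :
    (List.range m).foldl (fun dp k => pvSet2 dp (k+1) 0 (ra.getD k 0 - (dp.getD k []).getD 0 0))
      ((List.range (An+1)).map (fun _ => List.replicate (Bn+1) (0:Int)))
    = (List.range (An+1)).map (fun r => if r ≤ m then pvPart ra rb Bn r 0 else List.replicate (Bn+1) 0) := by
  induction m with
  | zero =>
    rw [List.range_zero, List.foldl_nil]
    apply List.map_congr_left
    intro r hr
    split_ifs with h
    · have : r = 0 := by omega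
      subst this
      exact pv_replicate_eq_part0 ra rb Bn
    · rfl
  | succ m ih =>
    rw [show List.range (m+1) = List.range m ++ [m] from List.range_succ, List.foldl_append, ih (by omega)]
    simp only [List.foldl_cons, List.foldl_nil]
    rw [pvSet2, PySem.List.getD_map_range _ _ _ _ (by omega),
        PySem.List.getD_map_range _ _ _ _ (by omega)]
    rw [if_pos le_rfl, if_neg (by omega)]
    rw [pv_part_getD ra rb Bn m 0 0 (by omega) le_rfl]
    have hv : ra.getD m 0 - pvG ra rb m 0 = pvG ra rb (m+1) 0 := by simp [pvG]
    rw [hv, pv_set_zero_replicate, pv_set_map_range]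
    apply List.map_congr_left
    intro r hr
    by_cases h : r = m+1
    · subst h; simp
    · have h2 : (r ≤ m) ↔ (r ≤ m+1) := by omega
      split_ifs <;> first | rfl | omega

-- A loop 2 (fill row 0)
lemma pvA2 (ra rb : List Int) (An Bn m : Nat) (hm : m ≤ Bn) :
    (List.range m).foldl (fun dp t => pvSet2 dp 0 (t+1) (rb.getD t 0 - (dp.getD 0 []).getD t 0))
      ((List.range (An+1)).map (fun r => pvPart ra rb Bn r 0))
    = (List.range (An+1)).map (fun r => if r = 0 then pvPart ra rb Bn 0 m else pvPart ra rb Bn r 0) := by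
  induction m with
  | zero =>
    rw [List.range_zero, List.foldl_nil]
    apply List.map_congr_left
    intro r hr
    split_ifs with h
    · subst h; rfl
    · rfl
  | succ m ih =>
    rw [show List.range (m+1) = List.range m ++ [m] from List.range_succ, List.foldl_append, ih (by omega)]
    simp only [List.foldl_cons, List.foldl_nil]
    rw [pvSet2, PySem.List.getD_map_range _ _ _ _ (by omega)]
    rw [if_pos rfl]
    rw [pv_part_getD ra rb Bn 0 m m (by omega) le_rfl]
    have hv : rb.getD m 0 - pvG ra rb 0 m = pvG ra rb 0 (m+1) := by simp [pvG]
    rw [hv, pv_part_set_succ, pv_set_map_range]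
    apply List.map_congr_left
    intro r hr
    by_cases h : r = 0
    · subst h; simp
    · simp [h]

-- A loop 3 inner (fill row i+1)
lemma pvA3i (ra rb : List Int) (An Bn i m : Nat) (hi : i < An) (hm : m ≤ Bn) :
    (List.range m).foldl (fun dp t => pvSet2 dp (i+1) (t+1)
        (max (ra.getD i 0 - (dp.getD i []).getD (t+1) 0) (rb.getD t 0 - (dp.getD (i+1) []).getD t 0)))
      ((List.range (An+1)).map (fun r => if r ≤ i then pvPart ra rb Bn r Bn else pvPart ra rb Bn r 0))
    = (List.range (An+1)).map (fun r => if r ≤ i then pvPart ra rb Bn r Bn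
        else if r = i+1 then pvPart ra rb Bn (i+1) m else pvPart ra rb Bn r 0) := by
  induction m with
  | zero =>
    rw [List.range_zero, List.foldl_nil]
    apply List.map_congr_left
    intro r hr
    by_cases h : r ≤ i
    · simp [h]
    · by_cases h2 : r = i+1
      · subst h2; simp [h]
      · simp [h, h2]
  | succ m ih =>
    rw [show List.range (m+1) = List.range m ++ [m] from List.range_succ, List.foldl_append, ih (by omega)]
    simp only [List.foldl_cons, List.foldl_nil]
    rw [pvSet2, PySem.List.getD_map_range _ _ _ _ (by omega),
        PySem.List.getD_map_range _ _ _ _ (by omega)]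
    rw [if_pos le_rfl, if_neg (by omega), if_pos rfl]
    rw [pv_part_getD ra rb Bn i Bn (m+1) (by omega) (by omega),
        pv_part_getD ra rb Bn (i+1) m m (by omega) le_rfl]
    have hv : max (ra.getD i 0 - pvG ra rb i (m+1)) (rb.getD m 0 - pvG ra rb (i+1) m)
        = pvG ra rb (i+1) (m+1) := by simp [pvG]
    rw [hv, pv_part_set_succ, pv_set_map_range]
    apply List.map_congr_left
    intro r hr
    by_cases h : r = i+1
    · subst h; simp
    · by_cases h2 : r ≤ i
      · simp [h, h2]
      · simp [h, h2]

-- A loop 3 outer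
lemma pvA3 (ra rb : List Int) (An Bn m : Nat) (hm : m ≤ An) :
    (List.range m).foldl (fun dp k => (List.range Bn).foldl (fun dp t => pvSet2 dp (k+1) (t+1)
        (max (ra.getD k 0 - (dp.getD k []).getD (t+1) 0) (rb.getD t 0 - (dp.getD (k+1) []).getD t 0))) dp)
      ((List.range (An+1)).map (fun r => if r ≤ 0 then pvPart ra rb Bn r Bn else pvPart ra rb Bn r 0))
    = (List.range (An+1)).map (fun r => if r ≤ m then pvPart ra rb Bn r Bn else pvPart ra rb Bn r 0) := by
  induction m with
  | zero => rfl
  | succ m ih =>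
    rw [show List.range (m+1) = List.range m ++ [m] from List.range_succ, List.foldl_append, ih (by omega)]
    simp only [List.foldl_cons, List.foldl_nil]
    rw [pvA3i ra rb An Bn m Bn (by omega) le_rfl]
    apply List.map_congr_left
    intro r hr
    by_cases h : r ≤ m
    · simp [h, (by omega : r ≤ m+1)]
    · by_cases h2 : r = m+1
      · subst h2; simp [h]
      · have h3 : ¬ r ≤ m + 1 := by omega
        rw [if_neg h2, if_neg h, if_neg h3]

-- A's port reduced to the closed game value.
lemma pvA_closed (An Bn : Nat) (a b : List Int) :
    solve (An : Int) (Bn : Int) a b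
      = PySem.Int.floordiv (a.sum + b.sum + pvG a.reverse b.reverse An Bn) 2 := by
  have ca : ∀ k : Nat, ((k:Int) + 1) = ((k+1 : Nat) : Int) := by intro k; push_cast; ring
  have cb : ∀ k : Nat, ((1:Int) + (k:Int)) = ((k+1 : Nat) : Int) := by intro k; push_cast; ring
  have cc : ∀ k : Nat, (((k+1 : Nat) : Int) - 1) = ((k : Nat) : Int) := by intro k; push_cast; ring
  have e1 : (((An:Int))+1).toNat = An+1 := by omega
  have e2 : (((Bn:Int))+1).toNat = Bn+1 := by omega
  have e3 : (((An:Int))+1-1).toNat = An := by omega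
  have e4 : (((Bn:Int))+1-1).toNat = Bn := by omega
  have e5 : List.replicate (An+1) (List.replicate (Bn+1) (0:Int))
      = (List.range (An+1)).map (fun _ => List.replicate (Bn+1) (0:Int)) := by
    rw [List.map_const', List.length_range]
  simp only [solve]
  rw [e1, e2]
  rw [PySem.List.pyRange_zero_natCast An, PySem.List.pyRange_zero_natCast Bn,
      PySem.List.pyRange_one 1 ((An:Int)+1), PySem.List.pyRange_one 1 ((Bn:Int)+1), e3, e4]
  simp only [List.foldl_map]
  simp only [ca, cb, cc, Int.toNat_natCast, PySem.List.pyGetD_natCast, List.getD_cons_succ]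
  rw [e5, pvA1 a.reverse b.reverse An Bn An le_rfl]
  have c1 : (List.range (An+1)).map (fun r => if r ≤ An then pvPart a.reverse b.reverse Bn r 0
      else List.replicate (Bn+1) 0) = (List.range (An+1)).map (fun r => pvPart a.reverse b.reverse Bn r 0) := by
    apply List.map_congr_left; intro r hr
    simp only [List.mem_range] at hr
    rw [if_pos (by omega)]
  rw [c1, pvA2 a.reverse b.reverse An Bn Bn le_rfl]
  have c2 : (List.range (An+1)).map (fun r => if r = 0 then pvPart a.reverse b.reverse Bn 0 Bn
      else pvPart a.reverse b.reverse Bn r 0)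
      = (List.range (An+1)).map (fun r => if r ≤ 0 then pvPart a.reverse b.reverse Bn r Bn
      else pvPart a.reverse b.reverse Bn r 0) := by
    apply List.map_congr_left; intro r hr
    by_cases h : r = 0
    · subst h; simp
    · rw [if_neg h, if_neg (by omega)]
  rw [c2, pvA3 a.reverse b.reverse An Bn An le_rfl]
  rw [PySem.List.getD_map_range _ _ _ _ (by omega), if_pos le_rfl,
      pv_part_getD a.reverse b.reverse Bn An Bn Bn le_rfl le_rfl]
  simp [List.sum_reverse]

-- ===== B-side: correctness of the stack-driven memoized loop =====

-- every memo entry is a grid cell carrying its game value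
def pvMemOK (ra rb : List Int) (An Bn : Nat) (memo : PySem.Dict (Int × Int) Int) : Prop :=
  ∀ p v, memo.get? p = some v →
    ∃ i j : Nat, p = ((i:Int), (j:Int)) ∧ i ≤ An ∧ j ≤ Bn ∧ v = pvG ra rb i j

-- the stack is a chain: each entry below is a parent of the one above it
def pvChain : List (Int × Int) → Prop
  | [] => True
  | [_] => True
  | p :: q :: rest => (q = (p.1 + 1, p.2) ∨ q = (p.1, p.2 + 1)) ∧ pvChain (q :: rest)

def pvInGrid (An Bn : Nat) (p : Int × Int) : Prop :=
  ∃ i j : Nat, p = ((i:Int), (j:Int)) ∧ i ≤ An ∧ j ≤ Bn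

-- unmemoized grid cells not currently on the stack — the loop's potential
def pvFree (An Bn : Nat) (memo : PySem.Dict (Int × Int) Int)
    (stack : List (Int × Int)) : Finset (Nat × Nat) :=
  (Finset.range (An+1) ×ˢ Finset.range (Bn+1)).filter
    (fun c => memo.get? ((c.1 : Int), (c.2 : Int)) = none ∧ ((c.1 : Int), (c.2 : Int)) ∉ stack)

lemma pvChain_tail (q : Int × Int) (rest : List (Int × Int)) (h : pvChain (q :: rest)) :
    pvChain rest := by
  cases rest with
  | nil => trivial
  | cons r rest' => exact h.2

lemma pvChain_sum_le (h : Int × Int) (t : List (Int × Int)) (hc : pvChain (h :: t)) :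
    ∀ p ∈ h :: t, h.1 + h.2 ≤ p.1 + p.2 := by
  induction t generalizing h with
  | nil => intro p hp; simp at hp; subst hp; exact le_rfl
  | cons q rest ih =>
    intro p hp
    rcases List.mem_cons.mp hp with rfl | hp'
    · exact le_rfl
    · have hq : q.1 + q.2 = h.1 + h.2 + 1 := by
        rcases hc.1 with hq | hq <;> (rw [hq]; simp; ring)
      have := ih q hc.2 p hp'
      omega

lemma pvG_succ_zero (ra rb : List Int) (i : Nat) :
    pvG ra rb (i+1) 0 = ra.getD i 0 - pvG ra rb i 0 := by simp [pvG]
lemma pvG_zero_succ (ra rb : List Int) (j : Nat) :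
    pvG ra rb 0 (j+1) = rb.getD j 0 - pvG ra rb 0 j := by simp [pvG]
lemma pvG_succ_succ (ra rb : List Int) (i j : Nat) :
    pvG ra rb (i+1) (j+1)
      = max (ra.getD i 0 - pvG ra rb i (j+1)) (rb.getD j 0 - pvG ra rb (i+1) j) := by simp [pvG]

-- the value the compute branch of pvLoop stores (its zeta-reduced form), for the proofs
def pvBest (ar br : List Int) (memo : PySem.Dict (Int × Int) Int) (iN jN : Nat) : Int :=
  (if 0 < (jN:Int) then
      match (if 0 < (iN:Int) then
          some (PySem.List.pyGetD (0 :: ar) (iN:Int) 0 - memo.getD ((iN:Int) - 1, (jN:Int)) 0)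
        else none) with
      | none => some (PySem.List.pyGetD (0 :: br) (jN:Int) 0 - memo.getD ((iN:Int), (jN:Int) - 1) 0)
      | some w =>
        if PySem.List.pyGetD (0 :: br) (jN:Int) 0 - memo.getD ((iN:Int), (jN:Int) - 1) 0 > w then
          some (PySem.List.pyGetD (0 :: br) (jN:Int) 0 - memo.getD ((iN:Int), (jN:Int) - 1) 0)
        else some w
    else if 0 < (iN:Int) then
      some (PySem.List.pyGetD (0 :: ar) (iN:Int) 0 - memo.getD ((iN:Int) - 1, (jN:Int)) 0)
    else none).getD 0

lemma pv_best_max (w v : Int) :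
    (Option.getD (if v > w then some v else some w) 0) = max w v := by
  rcases lt_or_ge w v with h | h
  · rw [if_pos h, Option.getD_some, max_eq_right h.le]
  · rw [if_neg (not_lt.mpr h), Option.getD_some, max_eq_left h]

lemma pv_cast_inj (c : Nat × Nat) (x y : Nat) :
    (((c.1 : Nat) : Int), ((c.2 : Nat) : Int)) = (((x : Nat) : Int), ((y : Nat) : Int)) ↔ c = (x, y) := by
  simp [Prod.ext_iff]

-- the main simulation: with enough fuel the loop preserves pvMemOK, only grows the memo,
-- and finishes with every stack entry memoized
lemma pvLoop_run (ar br : List Int) (An Bn : Nat) :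
    ∀ (fuel : Nat) (memo : PySem.Dict (Int × Int) Int) (stack : List (Int × Int)),
      pvMemOK ar br An Bn memo → pvChain stack → (∀ p ∈ stack, pvInGrid An Bn p) →
      stack.length + 2 * (pvFree An Bn memo stack).card ≤ fuel →
      pvMemOK ar br An Bn (pvLoop (0 :: ar) (0 :: br) fuel memo stack) ∧
      (∀ p v, memo.get? p = some v → (pvLoop (0 :: ar) (0 :: br) fuel memo stack).get? p = some v) ∧
      (∀ p ∈ stack, ((pvLoop (0 :: ar) (0 :: br) fuel memo stack).get? p).isSome) := by
  intro fuel
  induction fuel with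
  | zero =>
    intro memo stack hmem hch hgrid hmu
    have hs : stack = [] := by
      cases stack with
      | nil => rfl
      | cons h t => simp at hmu
    subst hs
    exact ⟨by simpa [pvLoop] using hmem, fun p v hp => by simpa [pvLoop] using hp, by simp⟩
  | succ fuel ih =>
    intro memo stack hmem hch hgrid hmu
    cases stack with
    | nil =>
      exact ⟨by simpa [pvLoop] using hmem, fun p v hp => by simpa [pvLoop] using hp, by simp⟩
    | cons hd rest =>
      obtain ⟨iN, jN, hpe, hiN, hjN⟩ := hgrid hd List.mem_cons_self
      obtain ⟨i, j⟩ := hd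
      simp only [Prod.mk.injEq] at hpe
      obtain ⟨rfl, rfl⟩ := hpe
      by_cases hmemo : (memo.get? ((iN : Int), (jN : Int))).isSome
      · -- pop: the head is already memoized
        rw [show pvLoop (0 :: ar) (0 :: br) (fuel+1) memo (((iN:Int),(jN:Int)) :: rest)
              = pvLoop (0 :: ar) (0 :: br) fuel memo rest by
            simp only [pvLoop, if_pos hmemo]]
        have hfree : pvFree An Bn memo rest = pvFree An Bn memo (((iN:Int),(jN:Int)) :: rest) := by
          apply Finset.ext
          intro c
          simp only [pvFree, Finset.mem_filter, List.mem_cons, not_or]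
          constructor
          · rintro ⟨hc1, hc2, hc3⟩
            refine ⟨hc1, hc2, ?_, hc3⟩
            intro hc
            rw [hc] at hc2
            rw [hc2] at hmemo
            simp at hmemo
          · rintro ⟨hc1, hc2, _, hc3⟩
            exact ⟨hc1, hc2, hc3⟩
        have hmu' : rest.length + 2 * (pvFree An Bn memo rest).card ≤ fuel := by
          rw [hfree]
          simp only [List.length_cons] at hmu
          omega
        have hrec := ih memo rest hmem (pvChain_tail _ _ hch)
          (fun p hp => hgrid p (List.mem_cons_of_mem _ hp)) hmu'
        refine ⟨hrec.1, hrec.2.1, ?_⟩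
        intro p hp
        rcases List.mem_cons.mp hp with rfl | hp'
        · obtain ⟨v, hv⟩ := Option.isSome_iff_exists.mp hmemo
          have := hrec.2.1 _ _ hv
          simp [this]
        · exact hrec.2.2 p hp'
      · by_cases hd1 : 0 < (iN : Int) ∧ memo.get? ((iN:Int) - 1, (jN:Int)) = none
        · -- push the (i-1, j) child
          rw [show pvLoop (0 :: ar) (0 :: br) (fuel+1) memo (((iN:Int),(jN:Int)) :: rest)
                = pvLoop (0 :: ar) (0 :: br) fuel memo (((iN:Int) - 1, (jN:Int)) :: ((iN:Int),(jN:Int)) :: rest) by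
              simp only [pvLoop, if_neg hmemo, if_pos hd1]]
          have hipos : 1 ≤ iN := by
            have := hd1.1
            omega
          have hcast : ((iN:Int) - 1, (jN:Int)) = (((iN-1 : Nat) : Int), ((jN : Nat) : Int)) := by
            rw [show ((iN-1 : Nat) : Int) = (iN:Int) - 1 from by omega]
          have hch' : pvChain (((iN:Int) - 1, (jN:Int)) :: ((iN:Int),(jN:Int)) :: rest) :=
            ⟨Or.inl (by rw [sub_add_cancel]), hch⟩
          have hgrid' : ∀ p ∈ ((iN:Int) - 1, (jN:Int)) :: ((iN:Int),(jN:Int)) :: rest, pvInGrid An Bn p := by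
            intro p hp
            rcases List.mem_cons.mp hp with rfl | hp'
            · exact ⟨iN - 1, jN, by rw [hcast], by omega, hjN⟩
            · exact hgrid p hp'
          have hnotmem : ((iN:Int) - 1, (jN:Int)) ∉ ((iN:Int),(jN:Int)) :: rest := by
            intro hc
            have := pvChain_sum_le ((iN:Int),(jN:Int)) rest hch _ hc
            simp only at this
            omega
          have hmemc : (iN - 1, jN) ∈ pvFree An Bn memo (((iN:Int),(jN:Int)) :: rest) := by
            simp only [pvFree, Finset.mem_filter, Finset.mem_product, Finset.mem_range]
            refine ⟨⟨by omega, by omega⟩, ?_, ?_⟩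
            · rw [← hcast]
              exact hd1.2
            · rw [← hcast]
              exact hnotmem
          have hkey : ∀ c : Nat × Nat,
              (((c.1 : Nat) : Int), ((c.2 : Nat) : Int)) = ((iN:Int) - 1, (jN:Int)) ↔ c = (iN - 1, jN) := by
            intro c
            rw [hcast]
            exact pv_cast_inj c _ _
          have hfree : pvFree An Bn memo (((iN:Int) - 1, (jN:Int)) :: ((iN:Int),(jN:Int)) :: rest)
              = (pvFree An Bn memo (((iN:Int),(jN:Int)) :: rest)).erase (iN - 1, jN) := by
            apply Finset.ext
            intro c
            simp only [pvFree, Finset.mem_filter, Finset.mem_erase, List.mem_cons, not_or]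
            constructor
            · rintro ⟨hc1, hc2, hne1, hne2, hc4⟩
              exact ⟨fun h => hne1 ((hkey c).mpr h), hc1, hc2, hne2, hc4⟩
            · rintro ⟨hne, hc1, hc2, hne2, hc4⟩
              exact ⟨hc1, hc2, fun h => hne ((hkey c).mp h), hne2, hc4⟩
          have hcard : (pvFree An Bn memo (((iN:Int) - 1, (jN:Int)) :: ((iN:Int),(jN:Int)) :: rest)).card + 1
              = (pvFree An Bn memo (((iN:Int),(jN:Int)) :: rest)).card := by
            rw [hfree, Finset.card_erase_of_mem hmemc]
            have : 0 < (pvFree An Bn memo (((iN:Int),(jN:Int)) :: rest)).card :=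
              Finset.card_pos.mpr ⟨_, hmemc⟩
            omega
          have hrec := ih memo _ hmem hch' hgrid'
            (by simp only [List.length_cons] at hmu ⊢; omega)
          exact ⟨hrec.1, hrec.2.1, fun p hp => hrec.2.2 p (List.mem_cons_of_mem _ hp)⟩
        · by_cases hd2 : 0 < (jN : Int) ∧ memo.get? ((iN:Int), (jN:Int) - 1) = none
          · -- push the (i, j-1) child
            rw [show pvLoop (0 :: ar) (0 :: br) (fuel+1) memo (((iN:Int),(jN:Int)) :: rest)
                  = pvLoop (0 :: ar) (0 :: br) fuel memo (((iN:Int), (jN:Int) - 1) :: ((iN:Int),(jN:Int)) :: rest) by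
                simp only [pvLoop, if_neg hmemo, if_neg hd1, if_pos hd2]]
            have hjpos : 1 ≤ jN := by
              have := hd2.1
              omega
            have hcast : ((iN:Int), (jN:Int) - 1) = (((iN : Nat) : Int), ((jN - 1 : Nat) : Int)) := by
              rw [show ((jN-1 : Nat) : Int) = (jN:Int) - 1 from by omega]
            have hch' : pvChain (((iN:Int), (jN:Int) - 1) :: ((iN:Int),(jN:Int)) :: rest) :=
              ⟨Or.inr (by rw [sub_add_cancel]), hch⟩
            have hgrid' : ∀ p ∈ ((iN:Int), (jN:Int) - 1) :: ((iN:Int),(jN:Int)) :: rest, pvInGrid An Bn p := by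
              intro p hp
              rcases List.mem_cons.mp hp with rfl | hp'
              · exact ⟨iN, jN - 1, by rw [hcast], hiN, by omega⟩
              · exact hgrid p hp'
            have hnotmem : ((iN:Int), (jN:Int) - 1) ∉ ((iN:Int),(jN:Int)) :: rest := by
              intro hc
              have := pvChain_sum_le ((iN:Int),(jN:Int)) rest hch _ hc
              simp only at this
              omega
            have hmemc : (iN, jN - 1) ∈ pvFree An Bn memo (((iN:Int),(jN:Int)) :: rest) := by
              simp only [pvFree, Finset.mem_filter, Finset.mem_product, Finset.mem_range]
              refine ⟨⟨by omega, by omega⟩, ?_, ?_⟩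
              · rw [← hcast]
                exact hd2.2
              · rw [← hcast]
                exact hnotmem
            have hkey : ∀ c : Nat × Nat,
                (((c.1 : Nat) : Int), ((c.2 : Nat) : Int)) = ((iN:Int), (jN:Int) - 1) ↔ c = (iN, jN - 1) := by
              intro c
              rw [hcast]
              exact pv_cast_inj c _ _
            have hfree : pvFree An Bn memo (((iN:Int), (jN:Int) - 1) :: ((iN:Int),(jN:Int)) :: rest)
                = (pvFree An Bn memo (((iN:Int),(jN:Int)) :: rest)).erase (iN, jN - 1) := by
              apply Finset.ext
              intro c
              simp only [pvFree, Finset.mem_filter, Finset.mem_erase, List.mem_cons, not_or]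
              constructor
              · rintro ⟨hc1, hc2, hne1, hne2, hc4⟩
                exact ⟨fun h => hne1 ((hkey c).mpr h), hc1, hc2, hne2, hc4⟩
              · rintro ⟨hne, hc1, hc2, hne2, hc4⟩
                exact ⟨hc1, hc2, fun h => hne ((hkey c).mp h), hne2, hc4⟩
            have hcard : (pvFree An Bn memo (((iN:Int), (jN:Int) - 1) :: ((iN:Int),(jN:Int)) :: rest)).card + 1
                = (pvFree An Bn memo (((iN:Int),(jN:Int)) :: rest)).card := by
              rw [hfree, Finset.card_erase_of_mem hmemc]
              have : 0 < (pvFree An Bn memo (((iN:Int),(jN:Int)) :: rest)).card :=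
                Finset.card_pos.mpr ⟨_, hmemc⟩
              omega
            have hrec := ih memo _ hmem hch' hgrid'
              (by simp only [List.length_cons] at hmu ⊢; omega)
            exact ⟨hrec.1, hrec.2.1, fun p hp => hrec.2.2 p (List.mem_cons_of_mem _ hp)⟩
          · -- compute the head's value and store it
            have hget1 : 0 < (iN:Int) → memo.getD ((iN:Int) - 1, (jN:Int)) 0 = pvG ar br (iN - 1) jN := by
              intro hip
              have hne : memo.get? ((iN:Int) - 1, (jN:Int)) ≠ none := fun hc => hd1 ⟨hip, hc⟩
              obtain ⟨v, hv⟩ := Option.ne_none_iff_exists'.mp hne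
              obtain ⟨i', j', he, _, _, hval⟩ := hmem _ _ hv
              simp only [Prod.mk.injEq] at he
              have hii : i' = iN - 1 := by omega
              have hjj : j' = jN := by omega
              rw [PySem.Dict.getD_eq_get?_getD, hv, Option.getD_some, hval, hii, hjj]
            have hget2 : 0 < (jN:Int) → memo.getD ((iN:Int), (jN:Int) - 1) 0 = pvG ar br iN (jN - 1) := by
              intro hjp
              have hne : memo.get? ((iN:Int), (jN:Int) - 1) ≠ none := fun hc => hd2 ⟨hjp, hc⟩
              obtain ⟨v, hv⟩ := Option.ne_none_iff_exists'.mp hne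
              obtain ⟨i', j', he, _, _, hval⟩ := hmem _ _ hv
              simp only [Prod.mk.injEq] at he
              have hii : i' = iN := by omega
              have hjj : j' = jN - 1 := by omega
              rw [PySem.Dict.getD_eq_get?_getD, hv, Option.getD_some, hval, hii, hjj]
            have hra : 1 ≤ iN → PySem.List.pyGetD (0 :: ar) ((iN:Nat) : Int) 0 = ar.getD (iN - 1) 0 := by
              intro hip
              rw [PySem.List.pyGetD_natCast]
              rw [show iN = (iN - 1) + 1 from by omega]
              simp
            have hrb : 1 ≤ jN → PySem.List.pyGetD (0 :: br) ((jN:Nat) : Int) 0 = br.getD (jN - 1) 0 := by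
              intro hjp
              rw [PySem.List.pyGetD_natCast]
              rw [show jN = (jN - 1) + 1 from by omega]
              simp
            have hstep : pvLoop (0 :: ar) (0 :: br) (fuel+1) memo (((iN:Int),(jN:Int)) :: rest)
                = pvLoop (0 :: ar) (0 :: br) fuel
                    (memo.insert ((iN:Int), (jN:Int)) (pvBest ar br memo iN jN)) rest := by
              simp only [pvLoop, if_neg hmemo, if_neg hd1, if_neg hd2]
              rfl
            rw [hstep]
            have hval : pvBest ar br memo iN jN = pvG ar br iN jN := by
              rcases Nat.eq_zero_or_pos iN with hi0 | hip <;> rcases Nat.eq_zero_or_pos jN with hj0 | hjp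
              · have hi' : ¬ (0:Int) < (iN:Int) := by omega
                have hj' : ¬ (0:Int) < (jN:Int) := by omega
                unfold pvBest
                rw [if_neg hj', if_neg hi', hi0, hj0]
                simp [pvG]
              · have hi' : ¬ (0:Int) < (iN:Int) := by omega
                have hj' : (0:Int) < (jN:Int) := by exact_mod_cast hjp
                have e2 := hrb hjp
                have e4 := hget2 hj'
                unfold pvBest
                rw [if_pos hj', if_neg hi']
                simp only [Option.getD_some]
                rw [e2, e4, hi0]
                rw [show jN = (jN - 1) + 1 from by omega]
                simp only [Nat.add_sub_cancel]
                rw [pvG_zero_succ]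
              · have hi' : (0:Int) < (iN:Int) := by exact_mod_cast hip
                have hj' : ¬ (0:Int) < (jN:Int) := by omega
                have e1 := hra hip
                have e3 := hget1 hi'
                unfold pvBest
                rw [if_neg hj', if_pos hi']
                simp only [Option.getD_some]
                rw [e1, e3, hj0]
                rw [show iN = (iN - 1) + 1 from by omega]
                simp only [Nat.add_sub_cancel]
                rw [pvG_succ_zero]
              · have hi' : (0:Int) < (iN:Int) := by exact_mod_cast hip
                have hj' : (0:Int) < (jN:Int) := by exact_mod_cast hjp
                have e1 := hra hip
                have e2 := hrb hjp
                have e3 := hget1 hi'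
                have e4 := hget2 hj'
                unfold pvBest
                rw [if_pos hj', if_pos hi']
                simp only [e1, e2, e3, e4]
                rw [show iN = (iN - 1) + 1 from by omega, show jN = (jN - 1) + 1 from by omega]
                simp only [Nat.add_sub_cancel]
                rw [pvG_succ_succ]
                exact pv_best_max (ar.getD (iN - 1) 0 - pvG ar br (iN - 1) ((jN - 1)+1))
                  (br.getD (jN - 1) 0 - pvG ar br ((iN - 1)+1) (jN - 1))
            have hmem' : pvMemOK ar br An Bn (memo.insert ((iN:Int), (jN:Int)) (pvBest ar br memo iN jN)) := by
              intro p v hp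
              rw [PySem.Dict.get?_insert] at hp
              split_ifs at hp with hpq
              · refine ⟨iN, jN, hpq, hiN, hjN, ?_⟩
                injection hp with h
                rw [← h, hval]
              · exact hmem p v hp
            have hfree : pvFree An Bn (memo.insert ((iN:Int), (jN:Int)) (pvBest ar br memo iN jN)) rest
                = pvFree An Bn memo (((iN:Int),(jN:Int)) :: rest) := by
              apply Finset.ext
              intro c
              simp only [pvFree, Finset.mem_filter, List.mem_cons, not_or, PySem.Dict.get?_insert]
              constructor
              · rintro ⟨hc1, hc2, hc3⟩
                by_cases hcq : (((c.1:Nat):Int), ((c.2:Nat):Int)) = ((iN:Int), (jN:Int))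
                · rw [if_pos hcq] at hc2
                  exact absurd hc2 (by simp)
                · rw [if_neg hcq] at hc2
                  exact ⟨hc1, hc2, hcq, hc3⟩
              · rintro ⟨hc1, hc2, hne, hc3⟩
                refine ⟨hc1, ?_, hc3⟩
                rw [if_neg hne]
                exact hc2
            have hmu' : rest.length
                + 2 * (pvFree An Bn (memo.insert ((iN:Int), (jN:Int)) (pvBest ar br memo iN jN)) rest).card ≤ fuel := by
              rw [hfree]
              simp only [List.length_cons] at hmu
              omega
            have hrec := ih (memo.insert ((iN:Int), (jN:Int)) (pvBest ar br memo iN jN)) rest hmem'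
              (pvChain_tail _ _ hch) (fun p hp => hgrid p (List.mem_cons_of_mem _ hp)) hmu'
            have hmono : ∀ p v, memo.get? p = some v →
                (memo.insert ((iN:Int), (jN:Int)) (pvBest ar br memo iN jN)).get? p = some v := by
              intro p v hp
              rw [PySem.Dict.get?_insert]
              split_ifs with hpq
              · rw [hpq] at hp
                rw [hp] at hmemo
                simp at hmemo
              · exact hp
            refine ⟨hrec.1, fun p v hp => hrec.2.1 p v (hmono p v hp), ?_⟩
            intro p hp
            rcases List.mem_cons.mp hp with rfl | hp'
            · have hself : (memo.insert ((iN:Int), (jN:Int)) (pvBest ar br memo iN jN)).get? ((iN:Int), (jN:Int))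
                  = some (pvBest ar br memo iN jN) := PySem.Dict.get?_insert_self _ _ _
              have := hrec.2.1 _ _ hself
              simp [this]
            · exact hrec.2.2 p hp'

-- B's port reduced to the same closed game value.
lemma pvB_closed (An Bn : Nat) (a b : List Int) :
    solve_alt (An : Int) (Bn : Int) a b
      = PySem.Int.floordiv (a.sum + b.sum + pvG a.reverse b.reverse An Bn) 2 := by
  have hmem0 : pvMemOK a.reverse b.reverse An Bn
      ((PySem.Dict.empty).insert ((0:Int), (0:Int)) 0) := by
    intro p v hp
    rw [PySem.Dict.get?_insert] at hp
    split_ifs at hp with hpq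
    · refine ⟨0, 0, by simpa using hpq, Nat.zero_le _, Nat.zero_le _, ?_⟩
      injection hp with h
      rw [← h]
      simp [pvG]
    · simp [PySem.Dict.get?_empty] at hp
  have hgrid0 : ∀ p ∈ [((An : Int), (Bn : Int))], pvInGrid An Bn p := by
    intro p hp
    simp only [List.mem_singleton] at hp
    exact ⟨An, Bn, hp, le_rfl, le_rfl⟩
  have hcard : (pvFree An Bn ((PySem.Dict.empty).insert ((0:Int), (0:Int)) 0)
      [((An : Int), (Bn : Int))]).card ≤ (An+1) * (Bn+1) := by
    unfold pvFree
    calc _ ≤ ((Finset.range (An+1)) ×ˢ (Finset.range (Bn+1))).card := Finset.card_filter_le _ _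
      _ = (An+1) * (Bn+1) := by rw [Finset.card_product, Finset.card_range, Finset.card_range]
  have hrun := pvLoop_run a.reverse b.reverse An Bn (2 * (An + 1) * (Bn + 1) + 2)
    ((PySem.Dict.empty).insert ((0:Int), (0:Int)) 0) [((An : Int), (Bn : Int))]
    hmem0 trivial hgrid0 (by simp only [List.length_cons, List.length_nil]; nlinarith)
  have hsome := hrun.2.2 _ List.mem_cons_self
  obtain ⟨v, hv⟩ := Option.isSome_iff_exists.mp hsome
  obtain ⟨i', j', he, _, _, hval⟩ := hrun.1 _ _ hv
  simp only [Prod.mk.injEq] at he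
  have hi' : i' = An := by omega
  have hj' : j' = Bn := by omega
  simp only [solve_alt, Int.toNat_natCast]
  rw [PySem.Dict.getD_eq_get?_getD, hv, Option.getD_some, hval, hi', hj']
  simp [List.sum_reverse]

-- ===== VERDICT (by name: the statement is the Claim_ definition above) =====
theorem solve_spec : Claim_equal_solve := by
  intro A B a b _ hpre
  obtain ⟨An, rfl⟩ := Int.eq_ofNat_of_zero_le hpre.1
  obtain ⟨Bn, rfl⟩ := Int.eq_ofNat_of_zero_le hpre.2.1
  unfold Spec_solve
  rw [pvA_closed, pvB_closed]
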